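-- pv_equiv track=rewrite | github.com/httk/httk | src/httk/core/miniparser.py | _build_first_table
-- ===== SOURCE A (Python) =====
-- def _build_first_table(rule_table, terminals):
--     """
--     Args:
--       rule_table: a rule table produced by _build_rule_table
--       terminals (list): list of terminals of the language
--
--     Returns:
--       A dict of the FIRST(symbol) function in LR parsing.  It maps all
--       symbols on a list of terminals that may be the very first thing
--       seen in the input when matching that production rule.
--     """
--     first = {}
--     lastcount = 0
--
--     for terminal in terminals:
--         first[terminal] = set([terminal])
--     for symbol in rule_table:
--         first[symbol] = set()
--
--     while True:
--         count = 0
--         for symbol in rule_table: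
--             for rhs_alts in rule_table[symbol]:
--                 if len(rhs_alts) > 0:
--                     first[symbol].update(first[rhs_alts[0]])
--             count += len(first[symbol])
--         if count == lastcount:
--             break
--         lastcount = count
--     return first
-- ===== SOURCE B (Python) =====
-- def _build_first_table(rule_table, terminals):
--     first = {t: {t} for t in terminals}
--     for s in rule_table:
--         first[s] = set()
--     # reverse dependency index: head symbol -> rule symbols whose some alternative starts with it
--     dependents = {}
--     for s in rule_table:
--         for alt in rule_table[s]:
--             if alt:
--                 dependents.setdefault(alt[0], set()).add(s)
--     # worklist propagation: only re-derive symbols whose inputs may have changed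
--     pending = set(rule_table)
--     while pending:
--         for s in rule_table:
--             if s in pending:
--                 pending.discard(s)
--                 n0 = len(first[s])
--                 for alt in rule_table[s]:
--                     if alt:
--                         first[s] |= first[alt[0]]
--                 if len(first[s]) != n0:
--                     pending |= dependents.get(s, set())
--     return first
-- ===== Notes on version B (the rewrite author's own statement) =====
-- stated objective: alternative
-- what changed: B builds a reverse dependency index (head symbol -> rules whose some alternative starts with it) and runs a worklist: only symbols whose inputs changed are re-derived and convergence is reached when the worklist empties, instead of A's blind full re-sweeps of every rule with a global size recount to detect the fixpoint.
import Mathlib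
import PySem

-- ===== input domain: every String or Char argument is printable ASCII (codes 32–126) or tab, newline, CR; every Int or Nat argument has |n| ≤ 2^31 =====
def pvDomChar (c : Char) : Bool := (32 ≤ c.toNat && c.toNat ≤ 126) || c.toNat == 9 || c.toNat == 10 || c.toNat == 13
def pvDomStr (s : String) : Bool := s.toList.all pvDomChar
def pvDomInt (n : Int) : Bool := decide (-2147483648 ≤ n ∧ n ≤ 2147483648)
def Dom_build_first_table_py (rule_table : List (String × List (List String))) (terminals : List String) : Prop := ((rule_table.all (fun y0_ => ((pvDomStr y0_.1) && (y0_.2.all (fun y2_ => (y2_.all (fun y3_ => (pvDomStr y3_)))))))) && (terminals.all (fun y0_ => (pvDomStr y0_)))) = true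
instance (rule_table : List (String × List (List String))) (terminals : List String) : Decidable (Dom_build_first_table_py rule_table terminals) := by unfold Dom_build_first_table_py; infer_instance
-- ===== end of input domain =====

-- B replaces A's repeated full sweeps with a size recount by a reverse dependency index and a
-- worklist: only symbols whose inputs changed are re-derived (objective: alternative).

-- ===== PORT A =====
-- One pass of A's while-loop: for each (symbol, alternatives) pair of the dict, update
-- first[symbol] from first[rhs_alts[0]] for every nonempty alternative, then add
-- len(first[symbol]) to the running count.  (The dict's keys are unique, so iterating its
-- pairs is exactly Python's 'for symbol in rule_table: … rule_table[symbol]'.)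
def pvSweepA (rule_table : List (String × List (List String)))
    (st : PySem.Dict String (PySem.Set String) × Nat) :
    PySem.Dict String (PySem.Set String) × Nat :=
  rule_table.foldl (fun st p =>
    let d := p.2.foldl (fun d rhs_alts =>
      if rhs_alts.length > 0 then
        -- first[symbol].update(first[rhs_alts[0]]); first[symbol] exists (it was initialised),
        -- so getD's default is never consulted on inputs admitted by Pre_
        d.insert p.1 (PySem.Set.union (d.getD p.1 []) (d.getD (PySem.List.pyGetD rhs_alts 0 "") []))
      else d) st.1
    (d, st.2 + (d.getD p.1 []).length)) st

-- A's 'while True' loop, ported with fuel: on inputs admitted by Pre_ the count strictly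
-- increases on every continued pass and is at most |rule_table|·|terminals|, so the fuel
-- below always outlasts the Python loop (the equivalence proof never needs this bound:
-- the two ports' loops are proved to stop at the same pass with the same fuel).
def pvLoopA (rule_table : List (String × List (List String))) :
    Nat → PySem.Dict String (PySem.Set String) → Nat → PySem.Dict String (PySem.Set String)
  | 0, d, _ => d
  | fuel+1, d, lastcount =>
    let st := pvSweepA rule_table (d, 0)
    if st.2 = lastcount then st.1 else pvLoopA rule_table fuel st.1 st.2

def build_first_table_py (rule_table : List (String × List (List String))) (terminals : List String) : List (String × List String) :=
  let first : PySem.Dict String (PySem.Set String) :=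
    terminals.foldl (fun d t => d.insert t (PySem.Set.ofList [t])) PySem.Dict.empty
  -- 'for symbol in rule_table: first[symbol] = set()'
  let first := rule_table.foldl (fun d p => d.insert p.1 PySem.Set.empty) first
  (pvLoopA rule_table (rule_table.length * terminals.length + 2) first 0).items

-- ===== PORT B =====
-- for s in rule_table: for alt in rule_table[s]: if alt: dependents.setdefault(alt[0], set()).add(s)
def pvDeps (rule_table : List (String × List (List String))) : PySem.Dict String (PySem.Set String) :=
  rule_table.foldl (fun d p =>
    p.2.foldl (fun d alt =>
      if alt ≠ [] then d.modify alt.headI [] (fun v => PySem.Set.add v p.1) else d) d)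
    PySem.Dict.empty

-- 'for alt in rule_table[s]: if alt: first[s] |= first[alt[0]]'  (alt[0] = alt.headI, alt ≠ [])
def pvInnerGo (s : String) (alts : List (List String))
    (d : PySem.Dict String (PySem.Set String)) : PySem.Dict String (PySem.Set String) :=
  alts.foldl (fun d alt =>
    if alt ≠ [] then d.insert s (PySem.Set.union (d.getD s []) (d.getD alt.headI [])) else d) d

-- body of B's scan over the rule symbols: process s only if it is pending; on growth of
-- first[s] (detected by the length, sets only ever grow) re-enqueue its dependents
def pvStepB (deps : PySem.Dict String (PySem.Set String))
    (st : PySem.Dict String (PySem.Set String) × PySem.Set String)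
    (p : String × List (List String)) :
    PySem.Dict String (PySem.Set String) × PySem.Set String :=
  if PySem.Set.contains st.2 p.1 then
    let pen1 := PySem.Set.discard st.2 p.1
    let n0 := (st.1.getD p.1 []).length
    let d1 := pvInnerGo p.1 p.2 st.1
    if (d1.getD p.1 []).length ≠ n0 then (d1, PySem.Set.union pen1 (deps.getD p.1 []))
    else (d1, pen1)
  else st

-- 'while pending: for s in rule_table: if s in pending: …', with the same fuel as A's port
def pvLoopB (rule_table : List (String × List (List String)))
    (deps : PySem.Dict String (PySem.Set String)) :
    Nat → PySem.Dict String (PySem.Set String) × PySem.Set String →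
    PySem.Dict String (PySem.Set String)
  | 0, st => st.1
  | fuel+1, st =>
    if st.2 = ([] : PySem.Set String) then st.1
    else pvLoopB rule_table deps fuel (rule_table.foldl (pvStepB deps) st)

def build_first_table_py_alt (rule_table : List (String × List (List String))) (terminals : List String) : List (String × List String) :=
  -- first = {t: {t} for t in terminals}
  let first : PySem.Dict String (PySem.Set String) :=
    PySem.Dict.ofList (terminals.map (fun t => (t, PySem.Set.ofList [t])))
  -- for s in rule_table: first[s] = set()
  let first := rule_table.foldl (fun d p => d.insert p.1 PySem.Set.empty) first
  let deps := pvDeps rule_table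
  -- pending = set(rule_table)
  let pending : PySem.Set String := PySem.Set.ofList (rule_table.map Prod.fst)
  (pvLoopB rule_table deps (rule_table.length * terminals.length + 2) (first, pending)).items

-- ===== PRECONDITION & SPEC =====
-- Pre_ excludes (a) association lists with duplicate keys, which no Python call can produce
-- (rule_table is a dict), and (b) grammars whose some leading right-hand-side symbol is
-- neither a terminal nor a rule key, on which A (and B) raise KeyError.
def Pre_build_first_table_py (rule_table : List (String × List (List String))) (terminals : List String) : Prop :=
  (rule_table.map Prod.fst).Nodup ∧
  ∀ p ∈ rule_table, ∀ alt ∈ p.2, alt ≠ [] → alt.headI ∈ terminals ∨ alt.headI ∈ rule_table.map Prod.fst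
instance (rule_table : List (String × List (List String))) (terminals : List String) : Decidable (Pre_build_first_table_py rule_table terminals) := by unfold Pre_build_first_table_py; infer_instance

def pvWitness_build_first_table_py : (List (String × List (List String))) × List String :=
  ([("S", [["a"], ["T", "b"]]), ("T", [["S"], []])], ["a", "b"])

def Spec_build_first_table_py (rule_table : List (String × List (List String))) (terminals : List String) (out : List (String × List String)) : Prop := out = build_first_table_py_alt rule_table terminals
instance (rule_table : List (String × List (List String))) (terminals : List String) (out : List (String × List String)) : Decidable (Spec_build_first_table_py rule_table terminals out) := by unfold Spec_build_first_table_py; infer_instance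

-- ===== CLAIM (what is proved, stated in full; the proofs are below) =====
def Claim_equal_build_first_table_py : Prop := ∀ (rule_table : List (String × List (List String))) (terminals : List String), Dom_build_first_table_py rule_table terminals → Pre_build_first_table_py rule_table terminals → Spec_build_first_table_py rule_table terminals (build_first_table_py rule_table terminals)

-- ===== LEMMAS AND PROOFS =====

-- 'symbol is saturated': first[s] already contains first[alt[0]] for every alternative
def pvSat (d : PySem.Dict String (PySem.Set String)) (p : String × List (List String)) : Prop :=
  ∀ alt ∈ p.2, alt ≠ [] → ∀ x ∈ d.getD alt.headI [], x ∈ d.getD p.1 []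

def pvSweep (rule_table : List (String × List (List String)))
    (d : PySem.Dict String (PySem.Set String)) : PySem.Dict String (PySem.Set String) :=
  rule_table.foldl (fun d p => pvInnerGo p.1 p.2 d) d

def pvRcount (rule_table : List (String × List (List String)))
    (d : PySem.Dict String (PySem.Set String)) : Nat :=
  (rule_table.map (fun p => (d.getD p.1 []).length)).sum

theorem pvUnion_prefix {s : PySem.Set String} (t : List String) :
    s <+: PySem.Set.union s t := by
  simp only [PySem.Set.union, PySem.Set.update]
  induction t generalizing s with
  | nil => exact List.prefix_refl s
  | cons x t ih =>
    rw [List.foldl_cons]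
    refine List.IsPrefix.trans ?_ (ih (s := PySem.Set.add s x))
    unfold PySem.Set.add
    split
    · exact List.prefix_refl s
    · exact List.prefix_append s [x]

theorem pvUnion_of_subset {s : PySem.Set String} {t : List String}
    (h : ∀ x ∈ t, x ∈ s) : PySem.Set.union s t = s := by
  simp only [PySem.Set.union, PySem.Set.update]
  induction t generalizing s with
  | nil => rfl
  | cons x t ih =>
    rw [List.foldl_cons, PySem.Set.add_of_mem (h x List.mem_cons_self)]
    exact ih (fun y hy => h y (List.mem_cons_of_mem _ hy))

theorem pvInsert_get?_self (d : PySem.Dict String (PySem.Set String)) (k : String)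
    (w : PySem.Set String) (hnd : d.keys.Nodup) (h : d.get? k = some w) :
    d.insert k w = d := by
  have hc : d.contains k = true := by
    rw [PySem.Dict.contains_eq_isSome_get?, h]; rfl
  apply PySem.Dict.ext
  rw [PySem.Dict.items_insert_of_contains _ _ hc]
  conv_rhs => rw [← List.map_id d.items]
  apply List.map_congr_left
  intro p hp
  by_cases hpk : p.1 = k
  · have h2 : d.get? p.1 = some p.2 := PySem.Dict.get?_of_mem_items d (by simpa using hp) hnd
    rw [hpk, h] at h2
    have : w = p.2 := by injection h2
    simp [hpk, this]
    rw [← hpk]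
  · simp [hpk]

theorem pvInsert_getD_self (d : PySem.Dict String (PySem.Set String)) (k : String)
    (hnd : d.keys.Nodup) (hc : d.contains k = true) :
    d.insert k (d.getD k []) = d := by
  obtain ⟨w, hw⟩ : ∃ w, d.get? k = some w := by
    rw [PySem.Dict.contains_eq_isSome_get?] at hc
    exact Option.isSome_iff_exists.mp hc
  rw [PySem.Dict.getD_of_get?_eq_some _ _ hw]
  exact pvInsert_get?_self d k w hnd hw

-- pvInnerGo basic structure ------------------------------------------------

theorem pvInnerGo_getD_ne (s : String) (alts : List (List String))
    (d : PySem.Dict String (PySem.Set String)) (k : String) (hk : k ≠ s) :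
    (pvInnerGo s alts d).getD k [] = d.getD k [] := by
  induction alts generalizing d with
  | nil => rfl
  | cons a alts ih =>
    unfold pvInnerGo
    rw [List.foldl_cons]
    refine Eq.trans (ih _) ?_
    split
    · exact PySem.Dict.getD_insert_of_ne _ _ _ hk
    · rfl

theorem pvInnerGo_prefix (s : String) (alts : List (List String))
    (d : PySem.Dict String (PySem.Set String)) :
    d.getD s [] <+: (pvInnerGo s alts d).getD s [] := by
  induction alts generalizing d with
  | nil => exact List.prefix_refl _
  | cons a alts ih =>
    unfold pvInnerGo
    rw [List.foldl_cons]
    refine List.IsPrefix.trans ?_ (ih _)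
    split
    · rw [PySem.Dict.getD_insert_self]
      exact pvUnion_prefix _
    · exact List.prefix_refl _

theorem pvInnerGo_prefix_all (s : String) (alts : List (List String))
    (d : PySem.Dict String (PySem.Set String)) (k : String) :
    d.getD k [] <+: (pvInnerGo s alts d).getD k [] := by
  by_cases hk : k = s
  · subst hk; exact pvInnerGo_prefix _ _ _
  · rw [pvInnerGo_getD_ne _ _ _ _ hk]

theorem pvInnerGo_nodup (s : String) (alts : List (List String))
    (d : PySem.Dict String (PySem.Set String)) (h : d.keys.Nodup) :
    (pvInnerGo s alts d).keys.Nodup := by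
  induction alts generalizing d with
  | nil => exact h
  | cons a alts ih =>
    unfold pvInnerGo
    rw [List.foldl_cons]
    refine ih _ ?_
    split
    · exact PySem.Dict.nodup_keys_insert _ _ _ h
    · exact h

theorem pvInnerGo_contains (s : String) (alts : List (List String))
    (d : PySem.Dict String (PySem.Set String)) (k : String) (h : d.contains k = true) :
    (pvInnerGo s alts d).contains k = true := by
  induction alts generalizing d with
  | nil => exact h
  | cons a alts ih =>
    unfold pvInnerGo
    rw [List.foldl_cons]
    refine ih _ ?_
    split
    · simp [PySem.Dict.contains_insert, h]
    · exact h

-- after processing s, s is saturated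
theorem pvInnerGo_sat (s : String) (alts : List (List String))
    (d : PySem.Dict String (PySem.Set String)) :
    ∀ alt ∈ alts, alt ≠ [] →
      ∀ x ∈ (pvInnerGo s alts d).getD alt.headI [], x ∈ (pvInnerGo s alts d).getD s [] := by
  induction alts generalizing d with
  | nil => intro alt h; simp at h
  | cons a alts ih =>
    intro alt halt hne x
    rcases List.mem_cons.mp halt with h | hmem
    · subst h
      unfold pvInnerGo
      rw [List.foldl_cons, if_pos hne]
      intro hx
      generalize hgen : d.insert s (PySem.Set.union (d.getD s []) (d.getD alt.headI [])) = d1 at hx ⊢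
      by_cases hh : alt.headI = s
      · rw [hh] at hx; exact hx
      · have hx' : x ∈ d1.getD alt.headI [] := by
          have := pvInnerGo_getD_ne s alts d1 alt.headI hh
          unfold pvInnerGo at this
          rw [this] at hx
          exact hx
        rw [← hgen, PySem.Dict.getD_insert_of_ne _ _ _ hh] at hx'
        have hx'' : x ∈ d1.getD s [] := by
          rw [← hgen, PySem.Dict.getD_insert_self]
          exact (PySem.Set.mem_union _ _ _).mpr (Or.inr hx')
        have hpre := pvInnerGo_prefix s alts d1
        unfold pvInnerGo at hpre
        exact hpre.subset hx''
    · intro hx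
      unfold pvInnerGo at hx ⊢
      rw [List.foldl_cons] at hx ⊢
      exact ih _ alt hmem hne x hx

theorem pvInnerGo_fix_of_sat (s : String) (alts : List (List String))
    (d : PySem.Dict String (PySem.Set String)) (hnd : d.keys.Nodup)
    (hc : d.contains s = true)
    (hsat : ∀ alt ∈ alts, alt ≠ [] → ∀ x ∈ d.getD alt.headI [], x ∈ d.getD s []) :
    pvInnerGo s alts d = d := by
  induction alts with
  | nil => rfl
  | cons a alts ih =>
    unfold pvInnerGo
    rw [List.foldl_cons]
    have hstep : (if a ≠ [] then
        d.insert s (PySem.Set.union (d.getD s []) (d.getD a.headI [])) else d) = d := by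
      split
      · next hne =>
        rw [pvUnion_of_subset (hsat a List.mem_cons_self hne)]
        exact pvInsert_getD_self d s hnd hc
      · rfl
    rw [hstep]
    exact ih (fun alt h hne => hsat alt (List.mem_cons_of_mem _ h) hne)

theorem pvInnerGo_fix_of_getD_eq (s : String) (alts : List (List String))
    (d : PySem.Dict String (PySem.Set String)) (hnd : d.keys.Nodup)
    (hc : d.contains s = true)
    (heq : (pvInnerGo s alts d).getD s [] = d.getD s []) :
    pvInnerGo s alts d = d := by
  induction alts generalizing d with
  | nil => rfl
  | cons a alts ih =>
    unfold pvInnerGo at heq ⊢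
    rw [List.foldl_cons] at heq ⊢
    by_cases hne : a ≠ []
    · rw [if_pos hne] at heq ⊢
      have h1 : d.getD s [] <+: PySem.Set.union (d.getD s []) (d.getD a.headI []) :=
        pvUnion_prefix _
      have h2 : PySem.Set.union (d.getD s []) (d.getD a.headI [])
          <+: (pvInnerGo s alts (d.insert s (PySem.Set.union (d.getD s []) (d.getD a.headI [])))).getD s [] := by
        have := pvInnerGo_prefix s alts
          (d.insert s (PySem.Set.union (d.getD s []) (d.getD a.headI [])))
        rwa [PySem.Dict.getD_insert_self] at this
      have heq' : (pvInnerGo s alts (d.insert s (PySem.Set.union (d.getD s []) (d.getD a.headI [])))).getD s []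
          = d.getD s [] := heq
      have hlen : (d.getD s []).length = (PySem.Set.union (d.getD s []) (d.getD a.headI [])).length := by
        have l1 := h1.length_le
        have l2 := h2.length_le
        rw [heq'] at l2
        omega
      have hud : d.getD s [] = PySem.Set.union (d.getD s []) (d.getD a.headI []) :=
        h1.eq_of_length hlen
      have hd1d : d.insert s (PySem.Set.union (d.getD s []) (d.getD a.headI [])) = d := by
        rw [← hud]
        exact pvInsert_getD_self d s hnd hc
      rw [hd1d] at heq' ⊢
      exact ih d hnd hc heq'
    · rw [if_neg hne] at heq ⊢
      exact ih d hnd hc heq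

-- A's inner loop is pvInnerGo
theorem pvInnerA_eq (p : String × List (List String)) (d : PySem.Dict String (PySem.Set String)) :
    p.2.foldl (fun d rhs_alts =>
      if rhs_alts.length > 0 then
        d.insert p.1 (PySem.Set.union (d.getD p.1 []) (d.getD (PySem.List.pyGetD rhs_alts 0 "") []))
      else d) d = pvInnerGo p.1 p.2 d := by
  unfold pvInnerGo
  congr 1
  funext d alt
  cases alt <;> simp [PySem.List.pyGetD, PySem.List.pyGet?, PySem.List.pyIdx?]

-- A's sweep: dict component and count ---------------------------------------

theorem pvSweepA_fst (rule_table : List (String × List (List String)))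
    (d : PySem.Dict String (PySem.Set String)) (c : Nat) :
    (pvSweepA rule_table (d, c)).1 = pvSweep rule_table d := by
  induction rule_table generalizing d c with
  | nil => rfl
  | cons p rt ih =>
    simp only [pvSweepA, pvSweep, List.foldl_cons] at *
    rw [pvInnerA_eq]
    exact ih _ _

theorem pvSweep_getD_ne (rule_table : List (String × List (List String)))
    (d : PySem.Dict String (PySem.Set String)) (s : String)
    (h : s ∉ rule_table.map Prod.fst) :
    (pvSweep rule_table d).getD s [] = d.getD s [] := by
  induction rule_table generalizing d with
  | nil => rfl
  | cons p rt ih =>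
    rw [List.map_cons, List.mem_cons] at h
    unfold pvSweep
    rw [List.foldl_cons]
    show (pvSweep rt _).getD s [] = _
    rw [ih _ (fun hh => h (Or.inr hh))]
    exact pvInnerGo_getD_ne _ _ _ _ (fun hh => h (Or.inl hh))

theorem pvSweepA_snd (rule_table : List (String × List (List String)))
    (hnd : (rule_table.map Prod.fst).Nodup)
    (d : PySem.Dict String (PySem.Set String)) (c : Nat) :
    (pvSweepA rule_table (d, c)).2 = c + pvRcount rule_table (pvSweepA rule_table (d, c)).1 := by
  induction rule_table generalizing d c with
  | nil => simp [pvSweepA, pvRcount]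
  | cons p rt ih =>
    rw [List.map_cons, List.nodup_cons] at hnd
    have hrec : pvSweepA (p :: rt) (d, c) =
        pvSweepA rt (pvInnerGo p.1 p.2 d, c + ((pvInnerGo p.1 p.2 d).getD p.1 []).length) := by
      rw [← pvInnerA_eq p d]
      rfl
    rw [hrec, ih hnd.2]
    have hent : (pvSweepA rt (pvInnerGo p.1 p.2 d,
        c + ((pvInnerGo p.1 p.2 d).getD p.1 []).length)).1.getD p.1 []
        = (pvInnerGo p.1 p.2 d).getD p.1 [] := by
      rw [pvSweepA_fst]
      exact pvSweep_getD_ne rt _ _ hnd.1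
    unfold pvRcount
    rw [List.map_cons, List.sum_cons, hent]
    omega

theorem pvSweep_nodup (rule_table : List (String × List (List String)))
    (d : PySem.Dict String (PySem.Set String)) (h : d.keys.Nodup) :
    (pvSweep rule_table d).keys.Nodup := by
  induction rule_table generalizing d with
  | nil => exact h
  | cons p rt ih =>
    unfold pvSweep
    rw [List.foldl_cons]
    exact ih _ (pvInnerGo_nodup _ _ _ h)

theorem pvSweep_contains (rule_table : List (String × List (List String)))
    (d : PySem.Dict String (PySem.Set String)) (k : String) (h : d.contains k = true) :
    (pvSweep rule_table d).contains k = true := by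
  induction rule_table generalizing d with
  | nil => exact h
  | cons p rt ih =>
    unfold pvSweep
    rw [List.foldl_cons]
    exact ih _ (pvInnerGo_contains _ _ _ _ h)

theorem pvRcount_mono (rule_table : List (String × List (List String)))
    (d d' : PySem.Dict String (PySem.Set String))
    (h : ∀ s, d.getD s [] <+: d'.getD s []) :
    pvRcount rule_table d ≤ pvRcount rule_table d' := by
  unfold pvRcount
  exact List.sum_le_sum (fun p _ => (h p.1).length_le)

theorem pvRcount_fold_mono (rule_table L : List (String × List (List String)))
    (d : PySem.Dict String (PySem.Set String)) :
    pvRcount rule_table d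
      ≤ pvRcount rule_table (L.foldl (fun d p => pvInnerGo p.1 p.2 d) d) := by
  induction L generalizing d with
  | nil => exact le_rfl
  | cons q L ih =>
    rw [List.foldl_cons]
    exact (pvRcount_mono _ _ _ (fun s => pvInnerGo_prefix_all _ _ _ _)).trans (ih _)

-- if a whole sweep does not change the count, every per-symbol derivation was already fixed
theorem pvSweep_fix_of_count (rule_table L : List (String × List (List String)))
    (d : PySem.Dict String (PySem.Set String)) (hnd : d.keys.Nodup)
    (hc : ∀ p ∈ L, d.contains p.1 = true)
    (hsub : ∀ p ∈ L, p ∈ rule_table)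
    (hcount : pvRcount rule_table (L.foldl (fun d p => pvInnerGo p.1 p.2 d) d)
      = pvRcount rule_table d) :
    (L.foldl (fun d p => pvInnerGo p.1 p.2 d) d = d) ∧ ∀ p ∈ L, pvInnerGo p.1 p.2 d = d := by
  induction L generalizing d with
  | nil => exact ⟨rfl, fun p h => by simp at h⟩
  | cons p L ih =>
    rw [List.foldl_cons] at hcount ⊢
    have hm1 : pvRcount rule_table d ≤ pvRcount rule_table (pvInnerGo p.1 p.2 d) :=
      pvRcount_mono _ _ _ (fun s => pvInnerGo_prefix_all _ _ _ _)
    have hm2 := pvRcount_fold_mono rule_table L (pvInnerGo p.1 p.2 d)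
    have hc1 : pvRcount rule_table (pvInnerGo p.1 p.2 d) = pvRcount rule_table d := by omega
    -- count unchanged at the step → first[p.1] unchanged → the step is literally the identity
    have hlen : (d.getD p.1 []).length = ((pvInnerGo p.1 p.2 d).getD p.1 []).length := by
      by_contra hnel
      have hlt : pvRcount rule_table d < pvRcount rule_table (pvInnerGo p.1 p.2 d) := by
        unfold pvRcount
        apply List.sum_lt_sum
        · intro q _
          exact (pvInnerGo_prefix_all p.1 p.2 d q.1).length_le
        · refine ⟨p, hsub p List.mem_cons_self, ?_⟩
          have := (pvInnerGo_prefix p.1 p.2 d).length_le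
          omega
      omega
    have hfix : pvInnerGo p.1 p.2 d = d := by
      refine pvInnerGo_fix_of_getD_eq p.1 p.2 d hnd (hc p List.mem_cons_self) ?_
      exact ((pvInnerGo_prefix p.1 p.2 d).eq_of_length hlen).symm
    rw [hfix] at hcount ⊢
    obtain ⟨h1, h2⟩ := ih d hnd (fun q hq => hc q (List.mem_cons_of_mem _ hq))
      (fun q hq => hsub q (List.mem_cons_of_mem _ hq)) hcount
    refine ⟨h1, fun q hq => ?_⟩
    rcases List.mem_cons.mp hq with h | h
    · rw [h]; exact hfix
    · exact h2 q h

theorem pvSweep_fix_of_sat (rule_table : List (String × List (List String)))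
    (d : PySem.Dict String (PySem.Set String))
    (hfix : ∀ p ∈ rule_table, pvInnerGo p.1 p.2 d = d) :
    pvSweep rule_table d = d := by
  unfold pvSweep
  induction rule_table with
  | nil => rfl
  | cons p rt ih =>
    rw [List.foldl_cons, hfix p List.mem_cons_self]
    exact ih (fun q hq => hfix q (List.mem_cons_of_mem _ hq))

-- the dependency index ------------------------------------------------------

-- one symbol's inner construction of the index
def pvDepsGo (s : String) (alts : List (List String))
    (d : PySem.Dict String (PySem.Set String)) : PySem.Dict String (PySem.Set String) :=
  alts.foldl (fun d alt =>
    if alt ≠ [] then d.modify alt.headI [] (fun v => PySem.Set.add v s) else d) d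

theorem pvDeps_eq (rule_table : List (String × List (List String))) :
    pvDeps rule_table
      = rule_table.foldl (fun d p => pvDepsGo p.1 p.2 d) PySem.Dict.empty := rfl

theorem pvDepsGo_mono (s : String) (alts : List (List String))
    (d : PySem.Dict String (PySem.Set String)) (k x : String) (h : x ∈ d.getD k []) :
    x ∈ (pvDepsGo s alts d).getD k [] := by
  induction alts generalizing d with
  | nil => exact h
  | cons a alts ih =>
    unfold pvDepsGo
    rw [List.foldl_cons]
    refine ih _ ?_
    split
    · rw [PySem.Dict.getD_modify]
      split
      · next hk => rw [hk] at h; exact (PySem.Set.mem_add _ _ _).mpr (Or.inl h)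
      · exact h
    · exact h

theorem pvDepsFold_mono (L : List (String × List (List String)))
    (d : PySem.Dict String (PySem.Set String)) (k x : String) (h : x ∈ d.getD k []) :
    x ∈ (L.foldl (fun d p => pvDepsGo p.1 p.2 d) d).getD k [] := by
  induction L generalizing d with
  | nil => exact h
  | cons p L ih =>
    rw [List.foldl_cons]
    exact ih _ (pvDepsGo_mono _ _ _ _ _ h)

theorem pvDepsGo_cov (s : String) (alts : List (List String))
    (d : PySem.Dict String (PySem.Set String)) :
    ∀ alt ∈ alts, alt ≠ [] → s ∈ (pvDepsGo s alts d).getD alt.headI [] := by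
  induction alts generalizing d with
  | nil => intro alt h; cases h
  | cons a alts ih =>
    intro alt halt hne
    unfold pvDepsGo
    rw [List.foldl_cons]
    rcases List.mem_cons.mp halt with rfl | hmem
    · rw [if_pos hne]
      refine pvDepsGo_mono s alts _ _ _ ?_
      rw [PySem.Dict.getD_modify, if_pos rfl]
      exact (PySem.Set.mem_add _ _ _).mpr (Or.inr rfl)
    · exact ih _ alt hmem hne

theorem pvDeps_cov (rule_table : List (String × List (List String))) :
    ∀ p ∈ rule_table, ∀ alt ∈ p.2, alt ≠ [] →
      p.1 ∈ (pvDeps rule_table).getD alt.headI [] := by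
  rw [pvDeps_eq]
  suffices h : ∀ (L : List (String × List (List String))) d, ∀ p ∈ L, ∀ alt ∈ p.2, alt ≠ [] →
      p.1 ∈ (L.foldl (fun d p => pvDepsGo p.1 p.2 d) d).getD alt.headI [] by
    exact h rule_table PySem.Dict.empty
  intro L
  induction L with
  | nil => intro d p h; cases h
  | cons q L ih =>
    intro d p hp alt halt hne
    rw [List.foldl_cons]
    rcases List.mem_cons.mp hp with rfl | hmem
    · exact pvDepsFold_mono L _ _ _ (pvDepsGo_cov p.1 p.2 d alt halt hne)
    · exact ih _ p hmem alt halt hne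

theorem pvDepsGo_sub (s : String) (alts : List (List String))
    (d : PySem.Dict String (PySem.Set String)) (k x : String)
    (h : x ∈ (pvDepsGo s alts d).getD k []) :
    x ∈ d.getD k [] ∨ x = s := by
  induction alts generalizing d with
  | nil => exact Or.inl h
  | cons a alts ih =>
    unfold pvDepsGo at h
    rw [List.foldl_cons] at h
    rcases ih _ h with h1 | h1
    · revert h1
      split
      · rw [PySem.Dict.getD_modify]
        split
        · next hk =>
          intro h1
          rcases (PySem.Set.mem_add _ _ _).mp h1 with h2 | h2
          · exact Or.inl (hk ▸ h2)
          · exact Or.inr h2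
        · exact Or.inl
      · exact Or.inl
    · exact Or.inr h1

theorem pvDeps_sub (rule_table : List (String × List (List String))) (k x : String)
    (h : x ∈ (pvDeps rule_table).getD k []) : x ∈ rule_table.map Prod.fst := by
  rw [pvDeps_eq] at h
  suffices hgen : ∀ (L : List (String × List (List String))) d,
      x ∈ (L.foldl (fun d p => pvDepsGo p.1 p.2 d) d).getD k [] →
      x ∈ d.getD k [] ∨ x ∈ L.map Prod.fst by
    rcases hgen rule_table PySem.Dict.empty h with h1 | h1
    · rw [PySem.Dict.getD_empty] at h1; cases h1
    · exact h1
  intro L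
  induction L with
  | nil => intro d h1; exact Or.inl h1
  | cons q L ih =>
    intro d h1
    rw [List.foldl_cons] at h1
    rcases ih _ h1 with h2 | h2
    · rcases pvDepsGo_sub _ _ _ _ _ h2 with h3 | h3
      · exact Or.inl h3
      · exact Or.inr (by rw [List.map_cons]; exact List.mem_cons.mpr (Or.inl h3))
    · exact Or.inr (List.mem_cons_of_mem _ h2)

-- the scan ------------------------------------------------------------------

-- B's scan computes exactly A's sweep and maintains the worklist invariant:
-- every rule symbol not on the worklist is saturated
theorem pvScan_sim (rule_table : List (String × List (List String)))
    (hnd : (rule_table.map Prod.fst).Nodup) :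
    ∀ (L : List (String × List (List String)))
      (d : PySem.Dict String (PySem.Set String)) (pen : PySem.Set String),
      d.keys.Nodup →
      (∀ p ∈ rule_table, d.contains p.1 = true) →
      (∀ p ∈ L, p ∈ rule_table) →
      (∀ q ∈ rule_table, q.1 ∉ pen → pvSat d q) →
      (L.foldl (pvStepB (pvDeps rule_table)) (d, pen)).1
        = L.foldl (fun d p => pvInnerGo p.1 p.2 d) d
      ∧ (∀ q ∈ rule_table,
          q.1 ∉ (L.foldl (pvStepB (pvDeps rule_table)) (d, pen)).2
          → pvSat (L.foldl (pvStepB (pvDeps rule_table)) (d, pen)).1 q) := by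
  intro L
  induction L with
  | nil => intro d pen _ _ _ hinv; exact ⟨rfl, hinv⟩
  | cons p L ih =>
    intro d pen hdnd hcont hsubL hinv
    rw [List.foldl_cons, List.foldl_cons]
    have hp_rt : p ∈ rule_table := hsubL p List.mem_cons_self
    have hsubL' : ∀ q ∈ L, q ∈ rule_table := fun q hq => hsubL q (List.mem_cons_of_mem _ hq)
    by_cases hin : PySem.Set.contains pen p.1 = true
    · -- p is pending: it is processed (d1 = pvInnerGo p.1 p.2 d) and discarded; if its
      -- first-set grew, its dependents are re-enqueued
      set d1 := pvInnerGo p.1 p.2 d with hd1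
      have hstep : pvStepB (pvDeps rule_table) (d, pen) p
          = (d1, if (d1.getD p.1 []).length ≠ (d.getD p.1 []).length
              then PySem.Set.union (PySem.Set.discard pen p.1) ((pvDeps rule_table).getD p.1 [])
              else PySem.Set.discard pen p.1) := by
        simp only [pvStepB, hin, if_pos]
        split <;> rfl
      have hd1nd : d1.keys.Nodup := pvInnerGo_nodup _ _ _ hdnd
      have hd1cont : ∀ q ∈ rule_table, d1.contains q.1 = true :=
        fun q hq => pvInnerGo_contains _ _ _ _ (hcont q hq)
      -- invariant after the step, for the worklist produced by the step
      have hinv1 : ∀ q ∈ rule_table,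
          q.1 ∉ (if (d1.getD p.1 []).length ≠ (d.getD p.1 []).length
              then PySem.Set.union (PySem.Set.discard pen p.1) ((pvDeps rule_table).getD p.1 [])
              else PySem.Set.discard pen p.1) → pvSat d1 q := by
        intro q hq hqpen
        by_cases hqp : q.1 = p.1
        · -- q = p: just processed, hence saturated
          have hqq : q = p :=
            List.inj_on_of_nodup_map hnd hq hp_rt hqp
          subst hqq
          intro alt halt hne x hx
          exact pvInnerGo_sat q.1 q.2 d alt halt hne x hx
        · -- q ≠ p: q was not pending before either
          have hqpen0 : q.1 ∉ pen := by
            intro hmem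
            apply hqpen
            have hdis : q.1 ∈ PySem.Set.discard pen p.1 :=
              (PySem.Set.mem_discard _ _ _).mpr ⟨hmem, hqp⟩
            split
            · exact (PySem.Set.mem_union _ _ _).mpr (Or.inl hdis)
            · exact hdis
          have hsatq : pvSat d q := hinv q hq hqpen0
          by_cases hgrow : (d1.getD p.1 []).length ≠ (d.getD p.1 []).length
          · -- p grew; q is saturated in d1 because every edge of q into p.1 would have
            -- re-enqueued q through the dependency index
            rw [if_pos hgrow] at hqpen
            intro alt halt hne x hx
            by_cases hh : alt.headI = p.1
            · exfalso
              apply hqpen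
              refine (PySem.Set.mem_union _ _ _).mpr (Or.inr ?_)
              rw [← hh]
              exact pvDeps_cov rule_table q hq alt halt hne
            · rw [hd1, pvInnerGo_getD_ne _ _ _ _ hh] at hx
              rw [hd1, pvInnerGo_getD_ne _ _ _ _ hqp]
              exact hsatq alt halt hne x hx
          · -- p did not grow: the step was literally the identity on the dict
            have hfix : d1 = d := by
              refine pvInnerGo_fix_of_getD_eq p.1 p.2 d hdnd (hcont p hp_rt) ?_
              rw [Ne, not_not] at hgrow
              exact ((pvInnerGo_prefix p.1 p.2 d).eq_of_length hgrow.symm).symm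
            rw [hfix]
            exact hsatq
      rw [hstep]
      exact ih d1 _ hd1nd hd1cont hsubL' hinv1
    · -- p is not pending: B skips it; by the invariant p is saturated, so A's
      -- processing of p is the identity as well
      have hstep : pvStepB (pvDeps rule_table) (d, pen) p = (d, pen) := by
        simp only [pvStepB, hin]
        rfl
      have hfix : pvInnerGo p.1 p.2 d = d := by
        refine pvInnerGo_fix_of_sat p.1 p.2 d hdnd (hcont p hp_rt) ?_
        have : p.1 ∉ pen := by
          intro hmem
          exact hin ((PySem.Set.contains_iff _ _).mpr hmem)
        exact hinv p hp_rt this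
      rw [hstep, hfix]
      exact ih d pen hdnd hcont hsubL' hinv

-- the worklist only ever contains rule symbols
theorem pvScan_pen_sub (rule_table : List (String × List (List String)))
    (L : List (String × List (List String)))
    (st : PySem.Dict String (PySem.Set String) × PySem.Set String) (x : String)
    (h : x ∈ (L.foldl (pvStepB (pvDeps rule_table)) st).2) :
    x ∈ st.2 ∨ x ∈ rule_table.map Prod.fst := by
  induction L generalizing st with
  | nil => exact Or.inl h
  | cons p L ih =>
    rw [List.foldl_cons] at h
    rcases ih _ h with h1 | h1
    · revert h1
      simp only [pvStepB]
      split
      · split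
        · intro h1
          rcases (PySem.Set.mem_union _ _ _).mp h1 with h2 | h2
          · exact Or.inl ((PySem.Set.mem_discard _ _ _).mp h2).1
          · exact Or.inr (pvDeps_sub rule_table _ _ h2)
        · intro h1
          exact Or.inl ((PySem.Set.mem_discard _ _ _).mp h1).1
      · exact Or.inl
    · exact Or.inr h1

-- a scan from an already-fixed dict performs no change and drains the worklist
theorem pvScan_drain (rule_table : List (String × List (List String)))
    (d : PySem.Dict String (PySem.Set String))
    (hfix : ∀ p ∈ rule_table, pvInnerGo p.1 p.2 d = d) :
    ∀ (L : List (String × List (List String))) (pen : PySem.Set String),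
      (∀ p ∈ L, p ∈ rule_table) →
      (L.foldl (pvStepB (pvDeps rule_table)) (d, pen)).1 = d
      ∧ ∀ x, x ∈ (L.foldl (pvStepB (pvDeps rule_table)) (d, pen)).2
          ↔ (x ∈ pen ∧ x ∉ L.map Prod.fst) := by
  intro L
  induction L with
  | nil => intro pen _; exact ⟨rfl, fun x => by simp⟩
  | cons p L ih
  =>
    intro pen hsub
    rw [List.foldl_cons]
    have hpfix := hfix p (hsub p List.mem_cons_self)
    by_cases hin : PySem.Set.contains pen p.1 = true
    · have hstep : pvStepB (pvDeps rule_table) (d, pen) p = (d, PySem.Set.discard pen p.1) := by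
        simp only [pvStepB, hin, if_pos, hpfix]
        rw [if_neg (by simp)]
      rw [hstep]
      obtain ⟨h1, h2⟩ := ih (PySem.Set.discard pen p.1) (fun q hq => hsub q (List.mem_cons_of_mem _ hq))
      refine ⟨h1, fun x => ?_⟩
      rw [h2 x, PySem.Set.mem_discard, List.map_cons, List.mem_cons]
      constructor
      · rintro ⟨⟨hx, hxp⟩, hxL⟩
        exact ⟨hx, fun h => h.elim (fun h => hxp h) hxL⟩
      · rintro ⟨hx, hxL⟩
        exact ⟨⟨hx, fun h => hxL (Or.inl h)⟩, fun h => hxL (Or.inr h)⟩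
    · have hstep : pvStepB (pvDeps rule_table) (d, pen) p = (d, pen) := by
        simp only [pvStepB, hin]
        rfl
      rw [hstep]
      obtain ⟨h1, h2⟩ := ih pen (fun q hq => hsub q (List.mem_cons_of_mem _ hq))
      refine ⟨h1, fun x => ?_⟩
      rw [h2 x, List.map_cons, List.mem_cons]
      have hxp : x ∈ pen → x ≠ p.1 := by
        intro hx hxp
        exact hin ((PySem.Set.contains_iff _ _).mpr (hxp ▸ hx))
      constructor
      · rintro ⟨hx, hxL⟩
        exact ⟨hx, fun h => h.elim (fun h => hxp hx h) hxL⟩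
      · rintro ⟨hx, hxL⟩
        exact ⟨hx, fun h => hxL (Or.inr h)⟩

theorem pvLoopB_nilpen (rule_table : List (String × List (List String)))
    (deps : PySem.Dict String (PySem.Set String)) (fuel : Nat)
    (d : PySem.Dict String (PySem.Set String)) :
    pvLoopB rule_table deps fuel (d, ([] : PySem.Set String)) = d := by
  cases fuel with
  | zero => rfl
  | succ fuel => simp [pvLoopB]

-- the two loops agree pass by pass: B's scan is A's sweep with the no-op derivations
-- skipped, and both stop at the first pass that changes nothing
theorem pvBisim (rule_table : List (String × List (List String)))
    (hnd : (rule_table.map Prod.fst).Nodup) :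
    ∀ (fuel : Nat) (d : PySem.Dict String (PySem.Set String)) (pen : PySem.Set String),
      d.keys.Nodup →
      (∀ p ∈ rule_table, d.contains p.1 = true) →
      (∀ x ∈ pen, x ∈ rule_table.map Prod.fst) →
      (∀ q ∈ rule_table, q.1 ∉ pen → pvSat d q) →
      pvLoopA rule_table fuel d (pvRcount rule_table d)
        = pvLoopB rule_table (pvDeps rule_table) fuel (d, pen) := by
  intro fuel
  induction fuel with
  | zero => intro d pen _ _ _ _; rfl
  | succ fuel ih =>
    intro d pen hdnd hcont hpen hinv
    have hA1 : (pvSweepA rule_table (d, 0)).1 = pvSweep rule_table d := pvSweepA_fst _ _ _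
    have hA2 : (pvSweepA rule_table (d, 0)).2
        = pvRcount rule_table (pvSweep rule_table d) := by
      have := pvSweepA_snd rule_table hnd d 0
      rw [hA1] at this
      omega
    by_cases hpennil : pen = ([] : PySem.Set String)
    · -- worklist empty: every symbol saturated, A's next sweep changes nothing and stops
      subst hpennil
      have hfix : ∀ p ∈ rule_table, pvInnerGo p.1 p.2 d = d := fun p hp =>
        pvInnerGo_fix_of_sat p.1 p.2 d hdnd (hcont p hp) (hinv p hp (by simp))
      have hSd : pvSweep rule_table d = d := pvSweep_fix_of_sat rule_table d hfix
      show (if (pvSweepA rule_table (d, 0)).2 = pvRcount rule_table d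
          then (pvSweepA rule_table (d, 0)).1
          else pvLoopA rule_table fuel (pvSweepA rule_table (d, 0)).1 (pvSweepA rule_table (d, 0)).2)
          = _
      rw [hA2, hSd, if_pos rfl, hA1, hSd]
      simp [pvLoopB]
    · -- worklist nonempty: B runs a scan, which is exactly A's sweep
      obtain ⟨hscan1, hscan2⟩ := pvScan_sim rule_table hnd rule_table d pen hdnd hcont
        (fun p hp => hp) hinv
      have hscan1' : (rule_table.foldl (pvStepB (pvDeps rule_table)) (d, pen)).1
          = pvSweep rule_table d := hscan1
      show (if (pvSweepA rule_table (d, 0)).2 = pvRcount rule_table d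
          then (pvSweepA rule_table (d, 0)).1
          else pvLoopA rule_table fuel (pvSweepA rule_table (d, 0)).1 (pvSweepA rule_table (d, 0)).2)
          = pvLoopB rule_table (pvDeps rule_table) (fuel+1) (d, pen)
      have hBstep : pvLoopB rule_table (pvDeps rule_table) (fuel+1) (d, pen)
          = pvLoopB rule_table (pvDeps rule_table) fuel
              (rule_table.foldl (pvStepB (pvDeps rule_table)) (d, pen)) := by
        simp [pvLoopB, hpennil]
      rw [hBstep]
      by_cases hcnt : pvRcount rule_table (pvSweep rule_table d) = pvRcount rule_table d
      · -- the pass changed nothing: A stops; B's scan drained the worklist and the next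
        -- check stops B with the same dict
        obtain ⟨hfold, hfixall⟩ := pvSweep_fix_of_count rule_table rule_table d hdnd
          (fun p hp => hcont p hp) (fun p hp => hp) hcnt
        have hSd : pvSweep rule_table d = d := hfold
        obtain ⟨hd1, hp1⟩ := pvScan_drain rule_table d hfixall rule_table pen (fun p hp => hp)
        have hpen' : (rule_table.foldl (pvStepB (pvDeps rule_table)) (d, pen)).2
            = ([] : PySem.Set String) := by
          rw [List.eq_nil_iff_forall_not_mem]
          intro x hx
          obtain ⟨hx1, hx2⟩ := (hp1 x).mp hx
          exact hx2 (hpen x hx1)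
        rw [hA2, hSd, if_pos rfl, hA1, hSd]
        have : (rule_table.foldl (pvStepB (pvDeps rule_table)) (d, pen))
            = (d, ([] : PySem.Set String)) := by
          exact Prod.ext (by rw [hd1]) (by rw [hpen'])
        rw [this, pvLoopB_nilpen]
      · -- the pass grew some first-set: both loops continue with the same state
        rw [hA2, if_neg (by omega), hA1]
        have hstate : (rule_table.foldl (pvStepB (pvDeps rule_table)) (d, pen))
            = (pvSweep rule_table d,
               (rule_table.foldl (pvStepB (pvDeps rule_table)) (d, pen)).2) := by
          exact Prod.ext hscan1' rfl
        rw [hstate]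
        exact ih (pvSweep rule_table d) _
          (pvSweep_nodup _ _ hdnd)
          (fun p hp => pvSweep_contains _ _ _ (hcont p hp))
          (fun x hx => by
            rcases pvScan_pen_sub rule_table rule_table (d, pen) x hx with h1 | h1
            · exact hpen x h1
            · exact h1)
          (fun q hq hqpen => by
            have := hscan2 q hq hqpen
            rwa [hscan1'] at this)

-- initialisation -----------------------------------------------------------

theorem pvInit_eq (terminals : List String) :
    (terminals.foldl (fun d t => d.insert t (PySem.Set.ofList [t])) PySem.Dict.empty)
      = PySem.Dict.ofList (terminals.map (fun t => (t, PySem.Set.ofList [t]))) := by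
  simp only [PySem.Dict.ofList, PySem.Dict.update, List.foldl_map]

theorem pvInitEntry_preserve (rule_table : List (String × List (List String)))
    (d : PySem.Dict String (PySem.Set String)) (s : String)
    (h : s ∉ rule_table.map Prod.fst) :
    (rule_table.foldl (fun d p => d.insert p.1 PySem.Set.empty) d).getD s [] = d.getD s [] := by
  induction rule_table generalizing d with
  | nil => rfl
  | cons p rt ih =>
    rw [List.map_cons, List.mem_cons] at h
    rw [List.foldl_cons, ih _ (fun hh => h (Or.inr hh))]
    exact PySem.Dict.getD_insert_of_ne _ _ _ (fun hh => h (Or.inl hh))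

theorem pvInitEntry (rule_table : List (String × List (List String)))
    (d : PySem.Dict String (PySem.Set String)) (s : String)
    (h : s ∈ rule_table.map Prod.fst) :
    (rule_table.foldl (fun d p => d.insert p.1 PySem.Set.empty) d).getD s [] = [] := by
  induction rule_table generalizing d with
  | nil => cases h
  | cons p rt ih =>
    rw [List.foldl_cons]
    rw [List.map_cons, List.mem_cons] at h
    by_cases hs : s ∈ rt.map Prod.fst
    · exact ih _ hs
    · have hsp : s = p.1 := h.resolve_right hs
      rw [pvInitEntry_preserve rt _ s hs, hsp]
      exact PySem.Dict.getD_insert_self _ _ _ _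

theorem pvContains_foldl_insert_empty (rt : List (String × List (List String)))
    (d : PySem.Dict String (PySem.Set String)) (k : String) (h : d.contains k = true) :
    (rt.foldl (fun d p => d.insert p.1 PySem.Set.empty) d).contains k = true := by
  induction rt generalizing d with
  | nil => exact h
  | cons p rt ih =>
    rw [List.foldl_cons]
    exact ih _ (by simp [PySem.Dict.contains_insert, h])

theorem pvInitContains (rule_table : List (String × List (List String)))
    (d : PySem.Dict String (PySem.Set String)) (s : String)
    (h : s ∈ rule_table.map Prod.fst) :
    (rule_table.foldl (fun d p => d.insert p.1 PySem.Set.empty) d).contains s = true := by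
  induction rule_table generalizing d with
  | nil => cases h
  | cons p rt ih =>
    rw [List.foldl_cons]
    rw [List.map_cons, List.mem_cons] at h
    by_cases hs : s ∈ rt.map Prod.fst
    · exact ih _ hs
    · have hsp : s = p.1 := h.resolve_right hs
      exact pvContains_foldl_insert_empty rt _ s
        (by rw [hsp]; exact PySem.Dict.contains_insert_self _ _ _)

-- ===== VERDICT (by name: the statement is the Claim_ definition above) =====
theorem build_first_table_py_spec : Claim_equal_build_first_table_py := by
  intro rule_table terminals _ hpre
  show build_first_table_py rule_table terminals = build_first_table_py_alt rule_table terminals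
  show (pvLoopA rule_table (rule_table.length * terminals.length + 2)
      (rule_table.foldl (fun d p => d.insert p.1 PySem.Set.empty)
        (terminals.foldl (fun d t => d.insert t (PySem.Set.ofList [t])) PySem.Dict.empty)) 0).items
    = (pvLoopB rule_table (pvDeps rule_table) (rule_table.length * terminals.length + 2)
      (rule_table.foldl (fun d p => d.insert p.1 PySem.Set.empty)
        (PySem.Dict.ofList (terminals.map (fun t => (t, PySem.Set.ofList [t])))),
       PySem.Set.ofList (rule_table.map Prod.fst))).items
  rw [← pvInit_eq terminals]
  set init := rule_table.foldl (fun d p => d.insert p.1 PySem.Set.empty)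
    (terminals.foldl (fun d t => d.insert t (PySem.Set.ofList [t])) PySem.Dict.empty) with hinit
  have h0 : pvRcount rule_table init = 0 := by
    unfold pvRcount
    apply List.sum_eq_zero
    intro n hn
    obtain ⟨p, hp, rfl⟩ := List.mem_map.mp hn
    rw [hinit, pvInitEntry rule_table _ p.1 (List.mem_map.mpr ⟨p, hp, rfl⟩)]
    rfl
  rw [show (0 : Nat) = pvRcount rule_table init from h0.symm]
  congr 1
  apply pvBisim rule_table hpre.1
  · apply PySem.Dict.nodup_keys_foldl_insert_key
    exact PySem.Dict.nodup_keys_foldl_insert terminals _ _ PySem.Dict.nodup_keys_empty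
  · intro p hp
    exact pvInitContains rule_table _ p.1 (List.mem_map.mpr ⟨p, hp, rfl⟩)
  · intro x hx
    exact (PySem.Set.mem_ofList _ _).mp hx
  · intro q hq hqpen
    exact absurd ((PySem.Set.mem_ofList _ _).mpr (List.mem_map.mpr ⟨q, hq, rfl⟩)) hqpen
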